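-- pv_equiv track=rewrite | github.com/rishabh-singh-byte/markdown-filter | filter/main/check_markdown.py | find_contiguous_empty_blocks
-- ===== SOURCE A (Python) =====
-- from typing import List, Dict, Any, Tuple, Optional
--
-- def find_contiguous_empty_blocks(row_empty_flags: List[bool]) -> List[Dict[str, int]]:
--     """
--     Finds contiguous blocks of empty cells in a row.
--     Returns list of dicts with start and end indices.
--     """
--     blocks = []
--     start = None
--     for i, flag in enumerate(row_empty_flags):
--         if flag and start is None:
--             start = i
--         if not flag and start is not None:
--             blocks.append({"start": start, "end": i - 1})
--             start = None
--     if start is not None: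
--         blocks.append({"start": start, "end": len(row_empty_flags) - 1})
--     return blocks
-- ===== SOURCE B (Python) =====
-- from itertools import groupby
--
-- def find_contiguous_empty_blocks(row_empty_flags):
--     blocks = []
--     idx = 0
--     for key, group in groupby(row_empty_flags):
--         length = sum(1 for _ in group)
--         if key:
--             blocks.append({"start": idx, "end": idx + length - 1})
--         idx += length
--     return blocks
-- ===== Notes on version B (the rewrite author's own statement) =====
-- stated objective: idiomatic
-- what changed: Replaces the per-element state machine with a start=None sentinel and a post-loop flush by itertools.groupby over runs: each True run yields one block directly from the accumulated index and run length.
import Mathlib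
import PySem

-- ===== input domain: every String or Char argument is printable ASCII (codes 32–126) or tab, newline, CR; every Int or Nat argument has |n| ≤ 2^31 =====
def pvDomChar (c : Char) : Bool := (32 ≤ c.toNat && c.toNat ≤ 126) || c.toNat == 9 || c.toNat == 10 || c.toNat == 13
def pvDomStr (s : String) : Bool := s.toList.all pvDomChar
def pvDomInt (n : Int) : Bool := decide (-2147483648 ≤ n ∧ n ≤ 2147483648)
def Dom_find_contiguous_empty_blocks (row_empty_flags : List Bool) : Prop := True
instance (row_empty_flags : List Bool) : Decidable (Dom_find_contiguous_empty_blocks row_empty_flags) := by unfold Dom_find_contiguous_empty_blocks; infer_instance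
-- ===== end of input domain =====

-- B replaces A's per-element start=None state machine (idiomatic groupby-over-runs
-- decomposition: one block per True run); same O(n) cost, return values proved equal.

-- ===== PORT A =====
-- A's loop: state (blocks, start), index i; the two sequential ifs of the body, then
-- the post-loop flush at the empty list (i = len(row_empty_flags) there).
def pvAGo (blocks : List (List (String × Int))) (start : Option Int) (i : Int) :
    List Bool → List (List (String × Int))
  | [] =>
      match start with
      | some s => blocks ++ [[("start", s), ("end", i - 1)]]
      | none => blocks
  | flag :: rest =>
      let start1 := if flag && start.isNone then some i else start
      match flag, start1 with
      | false, some s => pvAGo (blocks ++ [[("start", s), ("end", i - 1)]]) none (i + 1) rest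
      | _, _ => pvAGo blocks start1 (i + 1) rest

def find_contiguous_empty_blocks (row_empty_flags : List Bool) : List (List (String × Int)) :=
  pvAGo [] none 0 row_empty_flags

-- ===== PORT B =====
-- B's loop over groupby runs: take the maximal run equal to the head, emit a block if
-- the key is True, advance the index by the run length.
def pvBGo (i : Int) : List Bool → List (List (String × Int))
  | [] => []
  | x :: xs =>
      let len : Int := 1 + (xs.takeWhile (fun y => y == x)).length
      (if x then [[("start", i), ("end", i + len - 1)]] else []) ++
        pvBGo (i + len) (xs.dropWhile (fun y => y == x))
  termination_by l => l.length
  decreasing_by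
    simp only [List.length_cons]
    exact Nat.lt_succ_of_le (List.length_dropWhile_le _ _)

def find_contiguous_empty_blocks_alt (row_empty_flags : List Bool) : List (List (String × Int)) :=
  pvBGo 0 row_empty_flags

-- ===== PRECONDITION & SPEC =====
def Spec_find_contiguous_empty_blocks (row_empty_flags : List Bool) (out : List (List (String × Int))) : Prop := out = find_contiguous_empty_blocks_alt row_empty_flags
instance (row_empty_flags : List Bool) (out : List (List (String × Int))) : Decidable (Spec_find_contiguous_empty_blocks row_empty_flags out) := by unfold Spec_find_contiguous_empty_blocks; infer_instance

-- ===== CLAIM (what is proved, stated in full; the proofs are below) =====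
def Claim_equal_find_contiguous_empty_blocks : Prop := ∀ (row_empty_flags : List Bool), Dom_find_contiguous_empty_blocks row_empty_flags → Spec_find_contiguous_empty_blocks row_empty_flags (find_contiguous_empty_blocks row_empty_flags)

-- ===== LEMMAS AND PROOFS =====

theorem pvBGo_nil (i : Int) : pvBGo i [] = [] := by rw [pvBGo]

theorem pvBGo_cons (i : Int) (x : Bool) (xs : List Bool) :
    pvBGo i (x :: xs) =
      (if x then [[("start", i),
          ("end", i + (1 + ((xs.takeWhile (fun y => y == x)).length : Int)) - 1)]] else []) ++
        pvBGo (i + (1 + ((xs.takeWhile (fun y => y == x)).length : Int)))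
          (xs.dropWhile (fun y => y == x)) := by
  rw [pvBGo]

-- the accumulator factors out of A's loop
theorem pvAGo_acc (xs : List Bool) : ∀ (blocks : List (List (String × Int)))
    (start : Option Int) (i : Int),
    pvAGo blocks start i xs = blocks ++ pvAGo [] start i xs := by
  induction xs with
  | nil =>
      intro blocks start i
      cases start <;> simp [pvAGo]
  | cons x xs ih =>
      intro blocks start i
      cases x <;> cases start <;>
        simp only [pvAGo, Option.isNone_none, Option.isNone_some, Bool.and_true,
          Bool.and_false, Bool.false_and, Bool.true_and, Bool.false_eq_true, reduceIte]
      · rw [ih]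
      · rw [ih]
        conv_rhs => rw [ih]
        simp
      · rw [ih]
      · rw [ih]

-- skipping one leading False in B costs nothing
theorem pvBGo_skip_false (xs : List Bool) (i : Int) :
    pvBGo i (false :: xs) = pvBGo (i + 1) xs := by
  cases xs with
  | nil => simp [pvBGo_cons, pvBGo_nil]
  | cons y ys =>
      cases y with
      | false =>
          rw [pvBGo_cons, pvBGo_cons]
          simp only [List.takeWhile, List.dropWhile, beq_self_eq_true, if_true, if_false,
            List.length_cons, List.nil_append]
          congr 1
          push_cast
          ring
      | true =>
          rw [pvBGo_cons i false]
          simp [List.takeWhile, List.dropWhile]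

-- main invariant: A's loop from state `none` computes B's loop; from state `some s`
-- it closes the pending True run and continues as B does.
theorem pvAB (xs : List Bool) :
    (∀ i : Int, pvAGo [] none i xs = pvBGo i xs) ∧
    (∀ (i s : Int), pvAGo [] (some s) i xs =
      [("start", s), ("end", i + ((xs.takeWhile id).length : Int) - 1)] ::
        pvBGo (i + ((xs.takeWhile id).length : Int)) (xs.dropWhile id)) := by
  induction xs with
  | nil =>
      constructor
      · intro i; simp [pvAGo, pvBGo_nil]
      · intro i s; simp [pvAGo, pvBGo_nil]
  | cons x xs ih =>
      obtain ⟨ihP, ihQ⟩ := ih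
      constructor
      · intro i
        cases x with
        | false =>
            simp only [pvAGo, Option.isNone_none, Option.isNone_some, Bool.and_true,
              Bool.and_false, Bool.false_and, Bool.true_and, Bool.false_eq_true, reduceIte]
            rw [ihP, pvBGo_skip_false]
        | true =>
            simp only [pvAGo, Option.isNone_none, Option.isNone_some, Bool.and_true,
              Bool.and_false, Bool.false_and, Bool.true_and, Bool.false_eq_true, reduceIte]
            rw [ihQ]
            have hbeq : (fun y => y == true) = (id : Bool → Bool) := by
              funext y; cases y <;> rfl
            rw [pvBGo_cons, hbeq]
            simp only [if_true, List.takeWhile, List.dropWhile, List.singleton_append]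
            congr 2 <;> push_cast <;> ring
      · intro i s
        cases x with
        | false =>
            simp only [pvAGo, Option.isNone_none, Option.isNone_some, Bool.and_true,
              Bool.and_false, Bool.false_and, Bool.true_and, Bool.false_eq_true, reduceIte]
            rw [pvAGo_acc, ihP]
            simp [List.takeWhile, List.dropWhile, pvBGo_skip_false]
        | true =>
            simp only [pvAGo, Option.isNone_none, Option.isNone_some, Bool.and_true,
              Bool.and_false, Bool.false_and, Bool.true_and, Bool.false_eq_true, reduceIte]
            rw [ihQ]
            simp only [List.takeWhile, List.dropWhile, id, List.length_cons]
            congr 2 <;> push_cast <;> ring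

-- ===== VERDICT (by name: the statement is the Claim_ definition above) =====
theorem find_contiguous_empty_blocks_spec : Claim_equal_find_contiguous_empty_blocks := by
  intro xs _
  unfold Spec_find_contiguous_empty_blocks find_contiguous_empty_blocks find_contiguous_empty_blocks_alt
  exact (pvAB xs).1 0
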